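-- pv_equiv track=rewrite | github.com/Artemis-Holdings/TheSub | design/python/v1.py | return_mask_normalized
-- ===== SOURCE A (Python) =====
-- def return_mask_normalized(input_mask):
--     if '.' in input_mask:
--         mask_given = [int(i) for i in input_mask.split('.')]
--         return mask_given
--     else:
--         cidr = input_mask.replace('/', '')
--         mask_from_cidr = find_mask(cidr)
--         mask_found = mask_from_cidr  # .split(',')
--         return mask_found
--
-- def find_mask(c):
--     array_mask = []
--     b = c.split('.')
--     for i in range(0, 4):
--         array_mask.append(i)
--     c = int(c)
--     if c < 8:
--         w = 32 - (c + 24)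
--         array_mask[0] = 256 - 2 ** w
--         array_mask[1] = 0
--         array_mask[2] = 0
--         array_mask[3] = 0
--
--     else:
--         if c < 16:
--             x = 32 - (c + 16)
--             array_mask[0] = 255
--             array_mask[1] = 256 - (2 ** x)
--             array_mask[2] = 0
--             array_mask[3] = 0
--         else:
--             if c < 24:
--                 y = 32 - (c + 8)
--                 array_mask[0] = 255
--                 array_mask[1] = 255
--                 array_mask[2] = 256 - (2 ** y)
--                 array_mask[3] = 0
--             else:
--                 z = 32 - c
--                 array_mask[0] = 255
--                 array_mask[1] = 255
--                 array_mask[2] = 255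
--                 array_mask[3] = 256 - (2 ** z)
--     return array_mask
-- ===== SOURCE B (Python) =====
-- def return_mask_normalized(input_mask):
--     if '.' in input_mask:
--         return [int(i) for i in input_mask.split('.')]
--     c = int(input_mask.replace('/', ''))
--     m = (1 << 32) - (1 << (32 - c))
--     octets = []
--     for _ in range(4):
--         m, r = divmod(m, 256)
--         octets.append(r)
--     octets.reverse()
--     return octets
-- ===== Notes on version B (the rewrite author's own statement) =====
-- stated objective: alternative
-- what changed: Instead of a four-way branch ladder writing each octet by hand, B builds the whole 32-bit mask as one integer (1<<32) - (1<<(32-c)) and splits it into four octets with a divmod-by-256 loop.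
-- intended difference: On non-dotted inputs whose integer value c is negative, A returns a list whose first entry is a negative number like [-256, 0, 0, 0] (leftover 256-2**w arithmetic), while B returns [0, 0, 0, 0]; a negative prefix length has no set bits, so the all-zero mask is the intended value. — e.g. on return_mask_normalized("/-4"): A returns [-3840, 0, 0, 0], B returns [0, 0, 0, 0]
-- outside the precondition, e.g. on return_mask_normalized('/33'): A returns [255, 255, 255, 255.5], B raises ValueError
import Mathlib
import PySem

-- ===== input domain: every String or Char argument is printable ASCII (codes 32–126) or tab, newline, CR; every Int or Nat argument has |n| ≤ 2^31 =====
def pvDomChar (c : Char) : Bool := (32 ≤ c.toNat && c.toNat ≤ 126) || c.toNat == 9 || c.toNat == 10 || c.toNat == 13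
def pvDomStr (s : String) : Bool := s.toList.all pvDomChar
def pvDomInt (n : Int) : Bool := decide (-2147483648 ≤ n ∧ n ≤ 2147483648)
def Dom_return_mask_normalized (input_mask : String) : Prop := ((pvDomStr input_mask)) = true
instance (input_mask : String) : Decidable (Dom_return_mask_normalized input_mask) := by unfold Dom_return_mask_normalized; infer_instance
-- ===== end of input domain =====

-- B replaces A's four-way branch ladder by building the whole 32-bit mask integer
-- (1<<32) - (1<<(32-c)) and splitting it into octets with a divmod-by-256 loop.

-- ===== PORT A =====
-- find_mask: the initial loop appends 0,1,2,3; all four entries are then overwritten by the branch taken.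
-- int(c) is PySem.Int.ofStr?; a ValueError (none) is excluded by Pre_, .getD 0 is never reached there.
-- 2 ** e is ported as 2^e.toNat, exact for e ≥ 0; a negative exponent (c > 32) yields a Python float
-- (not an int list) and is excluded by Pre_.
def pv_find_mask (c : String) : List Int :=
  let array_mask : List Int := (List.range 4).map Int.ofNat
  let _b := PySem.Chars.splitOn c.toList ['.']
  let ci := (PySem.Int.ofStr? c).getD 0
  if ci < 8 then
    [256 - 2 ^ (32 - (ci + 24)).toNat, 0, 0, 0]
  else if ci < 16 then
    [255, 256 - 2 ^ (32 - (ci + 16)).toNat, 0, 0]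
  else if ci < 24 then
    [255, 255, 256 - 2 ^ (32 - (ci + 8)).toNat, 0]
  else
    let _ := array_mask
    [255, 255, 255, 256 - 2 ^ (32 - ci).toNat]

def return_mask_normalized (input_mask : String) : List Int :=
  if PySem.Str.isIn "." input_mask then
    (PySem.Chars.splitOn input_mask.toList ['.']).map (fun i => (PySem.Int.ofChars? i).getD 0)
  else
    pv_find_mask (PySem.Str.replace input_mask "/" "")

-- ===== PORT B =====
-- one iteration of Source B's loop body: m, r = divmod(m, 256); octets.append(r)
def pvStep (p : Int × List Int) (_ : Nat) : Int × List Int :=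
  let d := (PySem.Int.divmod? p.1 256).getD (0, 0)
  (d.1, p.2 ++ [d.2])

-- 1 << (32-c) ported as 2^(32-c).toNat; for c ≤ 32 (Pre_) the shift amount is nonnegative, exact.
def return_mask_normalized_alt (input_mask : String) : List Int :=
  if PySem.Str.isIn "." input_mask then
    (PySem.Chars.splitOn input_mask.toList ['.']).map (fun i => (PySem.Int.ofChars? i).getD 0)
  else
    let c := (PySem.Int.ofStr? (PySem.Str.replace input_mask "/" "")).getD 0
    let m : Int := 2 ^ 32 - 2 ^ (32 - c).toNat
    let st := (List.range 4).foldl pvStep (m, ([] : List Int))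
    st.2.reverse

-- ===== PRECONDITION & SPEC =====
-- Pre_ excludes exactly: a dotted mask with a part int() rejects (ValueError), and a CIDR string that
-- int() rejects (ValueError) or whose value exceeds 32 (Python A then returns a float octet, not an int).
def Pre_return_mask_normalized (input_mask : String) : Prop :=
  if PySem.Str.isIn "." input_mask then
    ∀ p ∈ PySem.Chars.splitOn input_mask.toList ['.'], (PySem.Int.ofChars? p).isSome = true
  else
    (PySem.Int.ofStr? (PySem.Str.replace input_mask "/" "")).isSome = true ∧
    (PySem.Int.ofStr? (PySem.Str.replace input_mask "/" "")).getD 0 ≤ 32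
instance (input_mask : String) : Decidable (Pre_return_mask_normalized input_mask) := by
  unfold Pre_return_mask_normalized; infer_instance

def pvWitness_return_mask_normalized : String := "/24"

-- On non-dotted inputs with negative integer value c, A returns a list whose first entry is negative
-- (leftover 256-2**w arithmetic), while B returns [0,0,0,0]; a negative prefix length has no set bits,
-- so the all-zero mask is the intended value.
def D_return_mask_normalized (input_mask : String) : Prop :=
  PySem.Str.isIn "." input_mask = false ∧
  (PySem.Int.ofStr? (PySem.Str.replace input_mask "/" "")).any (fun k => decide (k < 0)) = true
instance (input_mask : String) : Decidable (D_return_mask_normalized input_mask) := by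
  unfold D_return_mask_normalized; infer_instance

def Spec_return_mask_normalized (input_mask : String) (out : List Int) : Prop :=
  ¬ D_return_mask_normalized input_mask → out = return_mask_normalized_alt input_mask
instance (input_mask : String) (out : List Int) : Decidable (Spec_return_mask_normalized input_mask out) := by unfold Spec_return_mask_normalized; infer_instance

def pvDiffWitness_return_mask_normalized : String := "/-4"
def pvDiffWitnessOut_return_mask_normalized : (List Int) × (List Int) := ([-3840, 0, 0, 0], [0, 0, 0, 0])

-- ===== CLAIM (what is proved, stated in full; the proofs are below) =====
def Claim_unchanged_return_mask_normalized : Prop := ∀ (input_mask : String), Dom_return_mask_normalized input_mask → Pre_return_mask_normalized input_mask → Spec_return_mask_normalized input_mask (return_mask_normalized input_mask)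
def Claim_changed_return_mask_normalized : Prop := Dom_return_mask_normalized (pvDiffWitness_return_mask_normalized) ∧ Pre_return_mask_normalized (pvDiffWitness_return_mask_normalized) ∧ D_return_mask_normalized (pvDiffWitness_return_mask_normalized) ∧ return_mask_normalized (pvDiffWitness_return_mask_normalized) = pvDiffWitnessOut_return_mask_normalized.1 ∧ return_mask_normalized_alt (pvDiffWitness_return_mask_normalized) = pvDiffWitnessOut_return_mask_normalized.2 ∧ pvDiffWitnessOut_return_mask_normalized.1 ≠ pvDiffWitnessOut_return_mask_normalized.2
def Claim_exact_return_mask_normalized : Prop := ∀ (input_mask : String), Dom_return_mask_normalized input_mask → Pre_return_mask_normalized input_mask → D_return_mask_normalized input_mask → return_mask_normalized input_mask ≠ return_mask_normalized_alt input_mask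

-- ===== LEMMAS AND PROOFS =====

theorem pv_step_eq (x r : Int) (h0 : 0 ≤ r) (h1 : r < 256) :
    (PySem.Int.divmod? (x * 256 + r) 256).getD (0, 0) = (x, r) := by
  simp [PySem.Int.divmod?]
  refine ⟨?_, ?_⟩
  · rw [Int.fdiv_eq_ediv, if_pos (Or.inl (by norm_num))]; omega
  · rw [Int.fmod_eq_emod, if_pos (Or.inl (by norm_num))]; omega
theorem pvStep_eq (x r : Int) (l : List Int) (i : Nat) (h0 : 0 ≤ r) (h1 : r < 256) :
    pvStep (x * 256 + r, l) i = (x, l ++ [r]) := by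
  simp [pvStep, pv_step_eq x r h0 h1]
theorem pv_fold4 (q a b c d : Int)
    (ha0 : 0 ≤ a) (ha1 : a < 256) (hb0 : 0 ≤ b) (hb1 : b < 256)
    (hc0 : 0 ≤ c) (hc1 : c < 256) (hd0 : 0 ≤ d) (hd1 : d < 256) :
    ((List.range 4).foldl pvStep
      (((((q * 256 + a) * 256 + b) * 256 + c) * 256 + d), ([] : List Int))).2.reverse
      = [a, b, c, d] := by
  rw [show List.range 4 = [0, 1, 2, 3] from rfl]
  simp only [List.foldl]
  rw [pvStep_eq _ d _ _ hd0 hd1, pvStep_eq _ c _ _ hc0 hc1,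
      pvStep_eq _ b _ _ hb0 hb1, pvStep_eq _ a _ _ ha0 ha1]
  simp

theorem pv_branch_eq (c : Int) (hge : 0 ≤ c) (hle : c ≤ 32) :
    (if c < 8 then
      [256 - 2 ^ (32 - (c + 24)).toNat, 0, 0, 0]
    else if c < 16 then
      [255, 256 - 2 ^ (32 - (c + 16)).toNat, 0, 0]
    else if c < 24 then
      [255, 255, 256 - 2 ^ (32 - (c + 8)).toNat, 0]
    else
      ([255, 255, 255, 256 - 2 ^ (32 - c).toNat] : List Int)) =
    ((List.range 4).foldl pvStep
      ((2 ^ 32 - 2 ^ (32 - c).toNat : Int), ([] : List Int))).2.reverse := by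
  obtain ⟨n, hn⟩ : ∃ n : ℕ, (32 - c).toNat = n := ⟨_, rfl⟩
  rw [hn]
  by_cases h0 : c < 8
  · have hk : (32 - (c + 24)).toNat = n - 24 := by omega
    have hp1 : (0:Int) < 2 ^ (n - 24) := pow_pos (by norm_num) _
    have hp2 : (2:Int) ^ (n - 24) ≤ 2 ^ 8 := pow_le_pow_right₀ (by norm_num) (by omega)
    have hsplit : (2:Int) ^ n = 2 ^ (n - 24) * 2 ^ 24 := by rw [← pow_add]; congr 1; omega
    have hm : (2:Int) ^ 32 - 2 ^ n =
        (((0 * 256 + (256 - 2 ^ (n - 24))) * 256 + 0) * 256 + 0) * 256 + 0 := by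
      rw [hsplit]; ring
    rw [if_pos h0, hk, hm,
        pv_fold4 0 (256 - 2 ^ (n - 24)) 0 0 0 (by norm_num at hp2 ⊢; omega) (by omega)
          (by norm_num) (by norm_num) (by norm_num) (by norm_num) (by norm_num) (by norm_num)]
  · by_cases h1 : c < 16
    · have hk : (32 - (c + 16)).toNat = n - 16 := by omega
      have hp1 : (0:Int) < 2 ^ (n - 16) := pow_pos (by norm_num) _
      have hp2 : (2:Int) ^ (n - 16) ≤ 2 ^ 8 := pow_le_pow_right₀ (by norm_num) (by omega)
      have hsplit : (2:Int) ^ n = 2 ^ (n - 16) * 2 ^ 16 := by rw [← pow_add]; congr 1; omega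
      have hm : (2:Int) ^ 32 - 2 ^ n =
          ((((0 * 256 + 255) * 256 + (256 - 2 ^ (n - 16))) * 256 + 0) * 256 + 0) := by
        rw [hsplit]; ring
      rw [if_neg h0, if_pos h1, hk, hm,
          pv_fold4 0 255 (256 - 2 ^ (n - 16)) 0 0 (by norm_num) (by norm_num)
            (by norm_num at hp2 ⊢; omega) (by omega)
            (by norm_num) (by norm_num) (by norm_num) (by norm_num)]
    · by_cases h2 : c < 24
      · have hk : (32 - (c + 8)).toNat = n - 8 := by omega
        have hp1 : (0:Int) < 2 ^ (n - 8) := pow_pos (by norm_num) _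
        have hp2 : (2:Int) ^ (n - 8) ≤ 2 ^ 8 := pow_le_pow_right₀ (by norm_num) (by omega)
        have hsplit : (2:Int) ^ n = 2 ^ (n - 8) * 2 ^ 8 := by rw [← pow_add]; congr 1; omega
        have hm : (2:Int) ^ 32 - 2 ^ n =
            ((((0 * 256 + 255) * 256 + 255) * 256 + (256 - 2 ^ (n - 8))) * 256 + 0) := by
          rw [hsplit]; ring
        rw [if_neg h0, if_neg h1, if_pos h2, hk, hm,
            pv_fold4 0 255 255 (256 - 2 ^ (n - 8)) 0 (by norm_num) (by norm_num)
              (by norm_num) (by norm_num)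
              (by norm_num at hp2 ⊢; omega) (by omega) (by norm_num) (by norm_num)]
      · have hp1 : (0:Int) < 2 ^ n := pow_pos (by norm_num) _
        have hp2 : (2:Int) ^ n ≤ 2 ^ 8 := pow_le_pow_right₀ (by norm_num) (by omega)
        have hm : (2:Int) ^ 32 - 2 ^ n =
            ((((0 * 256 + 255) * 256 + 255) * 256 + 255) * 256 + (256 - 2 ^ n)) := by
          ring
        rw [if_neg h0, if_neg h1, if_neg h2, hm,
            pv_fold4 0 255 255 255 (256 - 2 ^ n) (by norm_num) (by norm_num)
              (by norm_num) (by norm_num) (by norm_num) (by norm_num)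
              (by norm_num at hp2 ⊢; omega) (by omega)]

theorem pv_branch_ne (c : Int) (hneg : c < 0) :
    (if c < 8 then
      [256 - 2 ^ (32 - (c + 24)).toNat, 0, 0, 0]
    else if c < 16 then
      [255, 256 - 2 ^ (32 - (c + 16)).toNat, 0, 0]
    else if c < 24 then
      [255, 255, 256 - 2 ^ (32 - (c + 8)).toNat, 0]
    else
      ([255, 255, 255, 256 - 2 ^ (32 - c).toNat] : List Int)) ≠
    ((List.range 4).foldl pvStep
      ((2 ^ 32 - 2 ^ (32 - c).toNat : Int), ([] : List Int))).2.reverse := by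
  obtain ⟨n, hn⟩ : ∃ n : ℕ, (32 - c).toNat = n := ⟨_, rfl⟩
  rw [hn]
  have hk : (32 - (c + 24)).toNat = n - 24 := by omega
  have hsplit : (2:Int) ^ n = 2 ^ (n - 32) * 2 ^ 32 := by rw [← pow_add]; congr 1; omega
  have hm : (2:Int) ^ 32 - 2 ^ n =
      ((((1 - 2 ^ (n - 32)) * 256 + 0) * 256 + 0) * 256 + 0) * 256 + 0 := by
    rw [hsplit]; ring
  have hp : (512:Int) ≤ 2 ^ (n - 24) := by
    calc (512:Int) = 2 ^ 9 := by norm_num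
    _ ≤ 2 ^ (n - 24) := pow_le_pow_right₀ (by norm_num) (by omega)
  rw [if_pos (by omega : c < 8), hk, hm,
      pv_fold4 (1 - 2 ^ (n - 32)) 0 0 0 0 (by norm_num) (by norm_num) (by norm_num)
        (by norm_num) (by norm_num) (by norm_num) (by norm_num) (by norm_num)]
  intro heq
  rw [List.cons.injEq] at heq
  have h := heq.1
  linarith

-- ===== VERDICT (by name: the statements are the Claim_ definitions above) =====
theorem return_mask_normalized_spec : Claim_unchanged_return_mask_normalized := by
  intro s _hdom hpre hnd
  unfold return_mask_normalized return_mask_normalized_alt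
  by_cases hdot : PySem.Str.isIn "." s = true
  · rw [if_pos hdot, if_pos hdot]
  · rw [if_neg hdot, if_neg hdot]
    unfold Pre_return_mask_normalized at hpre
    rw [if_neg hdot] at hpre
    have hfalse : PySem.Str.isIn "." s = false := by
      cases h : PySem.Str.isIn "." s with
      | false => rfl
      | true => exact absurd h hdot
    have hge : 0 ≤ (PySem.Int.ofStr? (PySem.Str.replace s "/" "")).getD 0 := by
      by_contra hlt
      obtain ⟨k, hk⟩ := Option.isSome_iff_exists.mp hpre.1
      rw [hk] at hlt
      simp only [Option.getD_some] at hlt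
      exact hnd ⟨hfalse, by rw [hk]; simpa using by omega⟩
    unfold pv_find_mask
    exact pv_branch_eq _ hge hpre.2

theorem return_mask_normalized_changed : Claim_changed_return_mask_normalized := by
  unfold Claim_changed_return_mask_normalized; decide

theorem return_mask_normalized_tight : Claim_exact_return_mask_normalized := by
  intro s _hdom _hpre hD
  obtain ⟨hf, hany⟩ := hD
  have hdot : ¬ PySem.Str.isIn "." s = true := by rw [hf]; simp
  have hneg : (PySem.Int.ofStr? (PySem.Str.replace s "/" "")).getD 0 < 0 := by
    cases h : PySem.Int.ofStr? (PySem.Str.replace s "/" "") with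
    | none => rw [h] at hany; simp at hany
    | some k => rw [h] at hany; simpa using hany
  unfold return_mask_normalized return_mask_normalized_alt
  rw [if_neg hdot, if_neg hdot]
  unfold pv_find_mask
  exact pv_branch_ne _ hneg
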